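-- pv_equiv track=rewrite | github.com/zwep/zwep | zwep/helper/miscfunction.py | cluster_diff_list
-- ===== SOURCE A (Python) =====
-- def cluster_diff_list(input_list, mapped_list=None):
--     """
--     Provides a way to cluster indices and map then to another vector. Example
--
--     x = [0, 0, 0, 0, 1, 1, 1, 2, 2, 2, 3, 3]
--     y = [5, 6, 1, 2, 3, 5, 5, 7, 8, 8, 9, 1]  # This one is related to x by index.
--
--     :param input_list: list with (possibliy) indices that might be related to mapped_list
--     :param mapped_list: optional arugment to map the found 'clusters' to a different mapping
--     :return: list of list with cluster ids or mapped cluster ids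
--     """
--     prev = 0
--     res = []
--     if mapped_list is None:
--         mapped_list = input_list
--
--     id_pos = [i for i, x in enumerate(diff_list(input_list)) if x > 0]
--     for i in id_pos:
--         res.append(list(mapped_list[prev:(i+1)]))
--         prev = i + 1
--     return res
--
-- def diff_list(input_list):
--     """
--     Returns the difference of a list
--
--     :param input_list: list with numeric values
--     :return: list with numeric values, but
--     """
--     return [j-i for i, j in zip(input_list[:-1], input_list[1:])]
-- ===== SOURCE B (Python) =====
-- def cluster_diff_list(input_list, mapped_list=None):
--     """Co-iteration rewrite: no diff_list, no index list, no slicing. Walk the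
--     adjacent pairs of input_list while consuming mapped_list one element at a
--     time through an iterator, growing the current group and flushing it at
--     each increase; the pending group at the end is discarded."""
--     if mapped_list is None:
--         mapped_list = input_list
--     it = iter(mapped_list)
--     sentinel = object()
--     res = []
--     cur = []
--     for a, b in zip(input_list, input_list[1:]):
--         m = next(it, sentinel)
--         if m is not sentinel:
--             cur.append(m)
--         if b - a > 0:
--             res.append(cur)
--             cur = []
--     return res
-- ===== Notes on version B (the rewrite author's own statement) =====
-- stated objective: alternative
-- what changed: Replaced A's staged index pipeline (build diff_list, collect positive positions by enumerate, then slice mapped_list at those absolute indices with a prev pointer) by an index-free co-iteration: zip over adjacent pairs while consuming mapped_list through an iterator, accumulating the current group element by element and flushing it at each increase; no diff list, no index list, no slicing. (measured ~1.6x faster at large n: it builds no intermediate diff/index lists).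
import Mathlib
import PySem

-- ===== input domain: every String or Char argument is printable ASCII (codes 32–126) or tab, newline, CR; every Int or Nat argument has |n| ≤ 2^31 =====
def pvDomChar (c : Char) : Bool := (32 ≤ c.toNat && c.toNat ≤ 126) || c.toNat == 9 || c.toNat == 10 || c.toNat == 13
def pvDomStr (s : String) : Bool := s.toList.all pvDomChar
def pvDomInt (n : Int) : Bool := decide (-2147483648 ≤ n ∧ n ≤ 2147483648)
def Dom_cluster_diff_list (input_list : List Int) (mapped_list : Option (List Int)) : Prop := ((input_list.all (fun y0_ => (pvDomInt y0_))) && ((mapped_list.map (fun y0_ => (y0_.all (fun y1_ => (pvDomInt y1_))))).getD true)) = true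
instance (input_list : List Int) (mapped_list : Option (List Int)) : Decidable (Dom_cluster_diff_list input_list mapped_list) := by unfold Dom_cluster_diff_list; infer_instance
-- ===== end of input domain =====

-- B replaces A's staged index pipeline (diff_list, positive positions, slicing at absolute
-- indices) by an index-free co-iteration that consumes mapped_list one element at a time
-- (objective: alternative). Both are total; equivalence is proved on all inputs.

-- ===== PORT A =====
-- diff_list: [j - i for i, j in zip(input_list[:-1], input_list[1:])]
def diff_list_port (input_list : List Int) : List Int :=
  (List.zip (PySem.List.slice input_list none (some (-1))) (PySem.List.slice input_list (some 1) none)).map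
    (fun p => p.2 - p.1)

-- res.append(list(mapped_list[prev:(i+1)])); prev = i + 1
def aStep (ml : List Int) (s : Int × List (List Int)) (i : Int) : Int × List (List Int) :=
  (i + 1, s.2 ++ [PySem.List.slice ml (some s.1) (some (i + 1))])

def cluster_diff_list (input_list : List Int) (mapped_list : Option (List Int)) : List (List Int) :=
  let ml := mapped_list.getD input_list
  let id_pos : List Int :=
    ((PySem.List.enumerate (diff_list_port input_list) 0).filter (fun p => decide (p.2 > 0))).map (·.1)
  (id_pos.foldl (aStep ml) (0, [])).2

-- ===== PORT B =====
-- loop body: take the next mapped element into cur (if any), flush cur when b - a > 0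
def altStep (s : List Int × List Int × List (List Int)) (p : Int × Int) :
    List Int × List Int × List (List Int) :=
  let cur' := match s.1 with
    | [] => s.2.1
    | m :: _ => s.2.1 ++ [m]
  let ms' := match s.1 with
    | [] => ([] : List Int)
    | _ :: rest => rest
  if p.2 - p.1 > 0 then (ms', [], s.2.2 ++ [cur']) else (ms', cur', s.2.2)

def cluster_diff_list_alt (input_list : List Int) (mapped_list : Option (List Int)) : List (List Int) :=
  let ml := mapped_list.getD input_list
  ((List.zip input_list (PySem.List.slice input_list (some 1) none)).foldl
    altStep (ml, [], [])).2.2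

-- ===== PRECONDITION & SPEC =====
def Spec_cluster_diff_list (input_list : List Int) (mapped_list : Option (List Int)) (out : List (List Int)) : Prop := out = cluster_diff_list_alt input_list mapped_list
instance (input_list : List Int) (mapped_list : Option (List Int)) (out : List (List Int)) : Decidable (Spec_cluster_diff_list input_list mapped_list out) := by unfold Spec_cluster_diff_list; infer_instance

-- ===== CLAIM (what is proved, stated in full; the proofs are below) =====
def Claim_equal_cluster_diff_list : Prop := ∀ (input_list : List Int) (mapped_list : Option (List Int)), Dom_cluster_diff_list input_list mapped_list → Spec_cluster_diff_list input_list mapped_list (cluster_diff_list input_list mapped_list)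

-- ===== LEMMAS AND PROOFS =====

-- adjacent differences, recursively (reference form of diff_list)
def diffs : List Int → List Int
  | a :: b :: t => (b - a) :: diffs (b :: t)
  | _ => []

-- reference grouping: cur = group under construction, ms = unconsumed mapped elements
def refD (cur ms : List Int) : List Int → List (List Int)
  | [] => []
  | d :: ds =>
      if d > 0 then (cur ++ ms.take 1) :: refD [] (ms.drop 1) ds
      else refD (cur ++ ms.take 1) (ms.drop 1) ds

lemma diff_list_eq_diffs (xs : List Int) : diff_list_port xs = diffs xs := by
  induction xs with
  | nil => simp [diff_list_port, diffs, PySem.List.slice_to_neg_one, PySem.List.slice_from_one]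
  | cons a t ih =>
    cases t with
    | nil => simp [diff_list_port, diffs, PySem.List.slice_to_neg_one, PySem.List.slice_from_one]
    | cons b t' =>
      simp only [diff_list_port, PySem.List.slice_to_neg_one, PySem.List.slice_from_one] at ih ⊢
      simp [diffs, List.dropLast_cons_of_ne_nil, ← ih]

lemma alt_fold_eq_refD (xs ms cur : List Int) (res : List (List Int)) :
    ((List.zip xs xs.tail).foldl altStep (ms, cur, res)).2.2 = res ++ refD cur ms (diffs xs) := by
  induction xs generalizing ms cur res with
  | nil => simp [diffs, refD]
  | cons a t ih =>
    cases t with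
    | nil => simp [diffs, refD]
    | cons b t' =>
      have hz : List.zip (a :: b :: t') (a :: b :: t').tail
          = (a, b) :: List.zip (b :: t') t' := by simp
      simp only [List.tail_cons] at ih
      rw [hz, List.foldl_cons]
      by_cases h : a < b
      · cases ms <;> simp [altStep, diffs, refD, h, ih]
      · cases ms <;> simp [altStep, diffs, refD, h, ih]

-- cur ++ (next mapped element, if any) extends the taken prefix by one
lemma take_succ_chunk (ml : List Int) (prev k : ℕ) (h : prev ≤ k) :
    (ml.drop prev).take (k - prev) ++ (ml.drop k).take 1 = (ml.drop prev).take (k + 1 - prev) := by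
  have h1 : k + 1 - prev = (k - prev) + 1 := by omega
  rw [h1, List.take_add]
  congr 2
  rw [List.drop_drop]
  congr 1
  omega

lemma a_fold_eq_refD (ds ml : List Int) (k prev : ℕ) (res : List (List Int)) (h : prev ≤ k) :
    (((((PySem.List.enumerate ds (k : Int)).filter (fun p => decide (p.2 > 0))).map (·.1)).foldl
        (aStep ml) (((prev : ℕ) : Int), res)).2)
      = res ++ refD ((ml.drop prev).take (k - prev)) (ml.drop k) ds := by
  induction ds generalizing k prev res with
  | nil => simp [PySem.List.enumerate_nil, refD]
  | cons d ds' ih =>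
    rw [PySem.List.enumerate_cons]
    by_cases hd : d > 0
    · have hcast : ((k : Int) + 1) = (((k + 1 : ℕ)) : Int) := by push_cast; ring
      simp only [List.filter_cons, decide_eq_true_eq, hd, if_pos, List.map_cons, List.foldl_cons,
        aStep, hcast]
      rw [ih (k + 1) (k + 1) _ (le_refl _)]
      have hslice : PySem.List.slice ml (some ((prev : ℕ) : Int)) (some (((k + 1 : ℕ)) : Int))
          = (ml.drop prev).take (k + 1 - prev) := by
        exact PySem.List.slice_natCast ml prev (k + 1)
      simp [refD, hd, List.drop_drop]
      rw [hcast, hslice, take_succ_chunk ml prev k h]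
    · have hcast : ((k : Int) + 1) = (((k + 1 : ℕ)) : Int) := by push_cast; ring
      simp only [List.filter_cons, decide_eq_true_eq, hd, if_neg, hcast, not_false_iff]
      rw [ih (k + 1) prev _ (by omega)]
      simp [refD, hd, List.drop_drop, ← take_succ_chunk ml prev k h]

-- ===== VERDICT (by name: the statement is the Claim_ definition above) =====
theorem cluster_diff_list_spec : Claim_equal_cluster_diff_list := by
  intro input_list mapped_list _
  unfold Spec_cluster_diff_list cluster_diff_list cluster_diff_list_alt
  rw [PySem.List.slice_from_one, diff_list_eq_diffs]
  have hA := a_fold_eq_refD (diffs input_list) (mapped_list.getD input_list) 0 0 [] (le_refl 0)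
  have hB := alt_fold_eq_refD input_list (mapped_list.getD input_list) [] []
  simp only [Nat.cast_zero, List.drop_zero, Nat.sub_zero, List.take_zero, List.nil_append] at hA hB
  simp [hA, hB]
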